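-- pv_equiv track=rewrite | github.com/LiliiaBilous/Sashikobot | main.py | build_vertical
-- ===== SOURCE A (Python) =====
-- def build_vertical(bits, height):
--     matrix = [[0]*len(bits) for _ in range(height)]
--     for col, bit in enumerate(bits):
--         current = int(bit)
--         for row in range(height):
--             matrix[row][col] = current
--             current = 1 - current
--     return matrix
-- ===== SOURCE B (Python) =====
-- def build_vertical(bits, height):
--     base = [int(b) for b in bits]
--     flipped = [1 - x for x in base]
--     return [list(base) if r % 2 == 0 else list(flipped) for r in range(height)]
-- ===== Notes on version B (the rewrite author's own statement) =====
-- stated objective: simpler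
-- what changed: B precomputes the base row and its flipped counterpart once and builds the matrix row-major by row parity, instead of A's column-by-column fill with a per-cell toggle.
import Mathlib
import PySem

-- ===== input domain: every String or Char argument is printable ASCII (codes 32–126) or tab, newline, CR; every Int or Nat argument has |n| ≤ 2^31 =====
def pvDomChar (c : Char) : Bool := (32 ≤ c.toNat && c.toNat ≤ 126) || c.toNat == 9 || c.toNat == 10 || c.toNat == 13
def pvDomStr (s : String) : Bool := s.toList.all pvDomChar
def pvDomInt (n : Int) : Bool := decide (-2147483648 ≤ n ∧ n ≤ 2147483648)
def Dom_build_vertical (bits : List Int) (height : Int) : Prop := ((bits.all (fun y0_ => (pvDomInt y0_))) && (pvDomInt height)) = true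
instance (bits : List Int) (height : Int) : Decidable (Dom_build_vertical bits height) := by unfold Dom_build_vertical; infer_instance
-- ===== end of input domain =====

-- ===== PORT A =====
-- literal transliteration of A: build an h x len(bits) zero matrix, then fill column by column,
-- toggling 'current' down each column.
def build_vertical (bits : List Int) (height : Int) : List (List Int) :=
  let matrix : List (List Int) :=
    (PySem.List.pyRange 0 height 1).map (fun _ => List.replicate bits.length (0 : Int))
  (PySem.List.enumerate bits 0).foldl
    (fun m cb =>
      let current : Int := cb.2
      ((PySem.List.pyRange 0 height 1).foldl
        (fun (st : List (List Int) × Int) row =>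
          (st.1.modify row.toNat (fun r => r.set cb.1.toNat st.2), 1 - st.2))
        (m, current)).1)
    matrix

-- ===== PORT B =====
-- B (Source B): precompute base and flipped rows once, build the matrix row-major by row parity.
def build_vertical_alt (bits : List Int) (height : Int) : List (List Int) :=
  let base := bits.map (fun b => b)
  let flipped := base.map (fun x => 1 - x)
  (PySem.List.pyRange 0 height 1).map (fun r => if r % 2 = 0 then base else flipped)

-- ===== PRECONDITION & SPEC =====
def Spec_build_vertical (bits : List Int) (height : Int) (out : List (List Int)) : Prop := out = build_vertical_alt bits height
instance (bits : List Int) (height : Int) (out : List (List Int)) : Decidable (Spec_build_vertical bits height out) := by unfold Spec_build_vertical; infer_instance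

-- ===== CLAIM (what is proved, stated in full; the proofs are below) =====
def Claim_equal_build_vertical : Prop := ∀ (bits : List Int) (height : Int), Dom_build_vertical bits height → Spec_build_vertical bits height (build_vertical bits height)

-- ===== LEMMAS AND PROOFS =====

-- write column 'col' down the matrix, toggling the value row by row
def colWrite (c : Int) (col : Nat) : List (List Int) → List (List Int)
  | [] => []
  | row :: rest => row.set col c :: colWrite (1 - c) col rest

-- modify at the junction of an append
theorem modify_append_len {α : Type} (m1 : List α) (x : α) (rest : List α) (f : α → α) :
    (m1 ++ x :: rest).modify m1.length f = m1 ++ f x :: rest := by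
  induction m1 with
  | nil => simp
  | cons a t ih => simpa using ih

-- the inner row loop over [s, s+1, …] equals colWrite on the tail of the matrix
theorem inner_loop_eq (m2 m1 : List (List Int)) (col : Nat) (c : Int) :
    (((List.range' m1.length m2.length).map (Int.ofNat)).foldl
      (fun (st : List (List Int) × Int) row =>
        (st.1.modify row.toNat (fun r => r.set col st.2), 1 - st.2))
      (m1 ++ m2, c)).1 = m1 ++ colWrite c col m2 := by
  induction m2 generalizing m1 c with
  | nil => simp [colWrite]
  | cons x rest ih =>
    have hmod : ((m1 ++ x :: rest).modify ((Int.ofNat m1.length)).toNat fun r => r.set col c)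
        = m1 ++ x.set col c :: rest := by
      rw [Int.ofNat_eq_natCast, Int.toNat_natCast, modify_append_len]
    simp only [List.length_cons, List.range'_succ, List.map_cons, List.foldl_cons, hmod]
    have h := ih (m1 ++ [x.set col c]) (1 - c)
    simp only [List.length_append, List.length_cons, List.length_nil,
      List.append_assoc, List.cons_append, List.nil_append] at h
    rw [show colWrite c col (x :: rest) = x.set col c :: colWrite (1 - c) col rest from rfl]
    simpa using h

-- colWrite distributes over cons, flipping the seed for the tail
theorem colWrite_cons (c : Int) (col : Nat) (x : List Int) (rest : List (List Int)) :
    colWrite c col (x :: rest) = x.set col c :: colWrite (1 - c) col rest := rfl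

-- folding colWrite over the column list, on a cons matrix, splits into head row and tail matrix
theorem fold_colWrite_cons (l : List (Int × Int)) (x : List Int) (rest : List (List Int)) :
    l.foldl (fun m p => colWrite p.2 p.1.toNat m) (x :: rest)
    = l.foldl (fun row p => row.set p.1.toNat p.2) x
      :: (l.map (fun p => (p.1, 1 - p.2))).foldl (fun m p => colWrite p.2 p.1.toNat m) rest := by
  induction l generalizing x rest with
  | nil => rfl
  | cons p t ih => simp [colWrite_cons, ih]

-- setting positions s, s+1, … of a row of length s + |b| with the values of b yields take s ++ b
theorem fold_set_enum (b : List Int) (s : Nat) (row : List Int) (hlen : row.length = s + b.length) :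
    (PySem.List.enumerate b (s : Int)).foldl (fun r p => r.set p.1.toNat p.2) row
    = row.take s ++ b := by
  induction b generalizing s row with
  | nil => simp at hlen; simp [PySem.List.enumerate_nil, List.take_of_length_le (le_of_eq hlen)]
  | cons v t ih =>
    rw [PySem.List.enumerate_cons]
    simp only [List.foldl_cons]
    have hs : ((s : Int)).toNat = s := Int.toNat_natCast s
    have hlt : s < row.length := by
      rw [hlen, List.length_cons]; omega
    have h2 : ((s : Int) + 1) = ((s + 1 : Nat) : Int) := by push_cast; ring
    rw [hs, h2, ih (s + 1) (row.set s v) (by rw [List.length_set, hlen, List.length_cons]; omega)]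
    have : (row.set s v).take (s + 1) = row.take s ++ [v] := by
      apply List.ext_getElem
      · simp [hlt]; omega
      · intro i h1 h2
        simp only [List.getElem_take, List.getElem_set]
        rcases Nat.lt_or_ge i s with h | h
        · rw [if_neg (by omega), List.getElem_append_left (by simp [List.length_take]; omega)]
          simp [List.getElem_take]
        · have hi : i = s := by
            simp only [List.length_take, List.length_set] at h1
            omega
          subst hi
          rw [if_pos rfl, List.getElem_append_right (by simp [List.length_take_of_le (Nat.le_of_lt hlt)])]
          simp [List.length_take, Nat.min_eq_left (Nat.le_of_lt hlt)]
    simp [this]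

-- enumerate commutes with flipping the values
theorem enumerate_map_flip (b : List Int) (s : Int) :
    (PySem.List.enumerate b s).map (fun p => (p.1, 1 - p.2))
    = PySem.List.enumerate (b.map (fun x => 1 - x)) s := by
  induction b generalizing s with
  | nil => simp [PySem.List.enumerate_nil]
  | cons v t ih => simp [PySem.List.enumerate_cons, ih]

-- colWrite of the empty matrix is empty, so the fold stays empty
theorem foldl_colWrite_nil (l : List (Int × Int)) :
    l.foldl (fun m p => colWrite p.2 p.1.toNat m) ([] : List (List Int)) = [] := by
  induction l with
  | nil => rfl
  | cons p t ih => simpa [colWrite] using ih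

-- folding colWrite over a replicate-matrix yields the alternating-rows matrix
theorem fold_colWrite_replicate (n : Nat) (l : List (Int × Int)) (r0 : List Int) :
    l.foldl (fun m p => colWrite p.2 p.1.toNat m) (List.replicate n r0)
    = (List.range n).map (fun r =>
        if r % 2 = 0 then l.foldl (fun row p => row.set p.1.toNat p.2) r0
        else (l.map (fun p => (p.1, 1 - p.2))).foldl (fun row p => row.set p.1.toNat p.2) r0) := by
  induction n generalizing l with
  | zero => simp [foldl_colWrite_nil]
  | succ k ih =>
    rw [List.replicate_succ, fold_colWrite_cons, ih, List.range_succ_eq_map]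
    rw [List.map_cons]
    refine congrArg₂ _ ?_ ?_
    · simp
    · conv_rhs => rw [List.map_map]
      apply List.map_congr_left
      intro r _
      have hcomp : ((fun p : Int × Int => (p.1, 1 - p.2)) ∘ fun p : Int × Int => (p.1, 1 - p.2)) = id :=
        funext (fun p => by cases p; simp)
      simp only [Function.comp_apply, Nat.succ_eq_add_one, List.map_map, hcomp, List.map_id]
      by_cases h : r % 2 = 0
      · have h1 : ¬ ((r + 1) % 2 = 0) := by omega
        simp only [if_pos h, if_neg h1]
      · have h1 : (r + 1) % 2 = 0 := by omega
        simp only [if_neg h, if_pos h1]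


-- colWrite preserves the number of rows
theorem colWrite_length (c : Int) (col : Nat) (m : List (List Int)) :
    (colWrite c col m).length = m.length := by
  induction m generalizing c with
  | nil => rfl
  | cons x rest ih => simp [colWrite, ih]

-- the whole outer loop of A, with the inner loop replaced by colWrite
theorem main_fold (n : Nat) (l : List (Int × Int)) (m : List (List Int)) (hm : m.length = n) :
    l.foldl (fun m cb =>
      ((((List.range' 0 n).map Int.ofNat).foldl
        (fun (st : List (List Int) × Int) row =>
          (st.1.modify row.toNat (fun r => r.set cb.1.toNat st.2), 1 - st.2)) (m, cb.2)).1)) m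
    = l.foldl (fun m p => colWrite p.2 p.1.toNat m) m := by
  induction l generalizing m with
  | nil => rfl
  | cons p t ih =>
    simp only [List.foldl_cons]
    have h := inner_loop_eq m [] p.1.toNat p.2
    simp only [List.length_nil, List.nil_append, hm] at h
    rw [h]
    exact ih _ (colWrite_length p.2 p.1.toNat m ▸ hm)

-- ===== VERDICT (by name: the statement is the Claim_ definition above) =====
theorem build_vertical_spec : Claim_equal_build_vertical := by
  intro bits height _
  unfold Spec_build_vertical
  simp only [build_vertical, build_vertical_alt]
  have hR : PySem.List.pyRange 0 height 1 = (List.range' 0 height.toNat).map Int.ofNat := by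
    apply List.ext_getElem
    · simp [PySem.List.length_pyRange_one]
    · intro i h1 h2
      rw [PySem.List.getElem_pyRange_one]
      simp [List.getElem_range']
  rw [hR]
  have hinit : ((List.range' 0 height.toNat).map Int.ofNat).map
      (fun _ => List.replicate bits.length (0 : Int))
      = List.replicate height.toNat (List.replicate bits.length (0 : Int)) := by
    apply List.ext_getElem <;> simp
  rw [hinit, main_fold height.toNat _ _ (by simp), fold_colWrite_replicate]
  have hbase : (PySem.List.enumerate bits 0).foldl (fun row p => row.set p.1.toNat p.2)
      (List.replicate bits.length (0 : Int)) = bits := by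
    have := fold_set_enum bits 0 (List.replicate bits.length (0 : Int)) (by simp)
    simpa using this
  have hflip : ((PySem.List.enumerate bits 0).map (fun p => (p.1, 1 - p.2))).foldl
      (fun row p => row.set p.1.toNat p.2) (List.replicate bits.length (0 : Int))
      = bits.map (fun x => 1 - x) := by
    rw [enumerate_map_flip]
    have := fold_set_enum (bits.map (fun x => 1 - x)) 0
      (List.replicate bits.length (0 : Int)) (by simp)
    simpa using this
  rw [hbase, hflip, List.map_map, List.range_eq_range']
  apply List.map_congr_left
  intro k hk
  simp only [Function.comp_apply]
  have hpar : ((Int.ofNat k) % 2 = 0) ↔ (k % 2 = 0) := by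
    rw [Int.ofNat_eq_natCast]
    omega
  by_cases h : k % 2 = 0
  · simp only [if_pos h, if_pos (hpar.mpr h)]
    simp
  · simp only [if_neg h, if_neg (fun hc => h (hpar.mp hc))]
    simp
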